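-- pv_equiv track=rewrite | github.com/ioaksenenko/neural_networks | 3_tagging_submasks_maker/datamaker/type_1/main.py | text_input_question_generate
-- ===== SOURCE A (Python) =====
-- def text_input_question_generate(n=1):
--     inputs = []
--     outputs = []
--     input = ['___T____']
--     output = ['[item]T[/item]']
--     for _ in range(2 * n):
--         input.append('________')
--     for i in range(n):
--         input[0] += '___________' + '________'
--         output.append('[textinput][answer]T[/answer][/textinput]')
--         output.append('T')
--         for j in range(n):
--             if j == i:
--                 input[2 * j + 1] += '___{=T}____' + '________'
--                 input[2 * j + 2] += '___________' + '___T____'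
--             else:
--                 input[2 * j + 1] += '___________' + '________'
--                 input[2 * j + 2] += '___________' + '________'
--     #inputs.append([re.sub(r'_+', '_', el) for el in input])
--     inputs.append(input)
--     outputs.append(output)
--     #inputs.append([re.sub(r'_+', '_', el) for el in input[:len(input) - 1]])
--     inputs.append([el[:len(el) - 8] for el in input][:len(input) - 1])
--     outputs.append(output[:len(output) - 1])
--     #inputs.append(input[:len(input) - 1])
--     #outputs.append(output[:len(output) - 1])
--     return inputs, outputs
-- ===== SOURCE B (Python) =====
-- def text_input_question_generate(n=1):
--     normal = '___________' + '________'
--     rows = ['___T____' + normal * n]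
--     for j in range(n):
--         rows.append('________' + normal * j + '___{=T}____' + '________' + normal * (n - 1 - j))
--         rows.append('________' + normal * j + '___________' + '___T____' + normal * (n - 1 - j))
--     out = ['[item]T[/item]'] + ['[textinput][answer]T[/answer][/textinput]', 'T'] * n
--     inputs = [rows, [el[:len(el) - 8] for el in rows][:len(rows) - 1]]
--     outputs = [out, out[:len(out) - 1]]
--     return inputs, outputs
-- ===== Notes on version B (the rewrite author's own statement) =====
-- stated objective: faster
-- what changed: B builds every row directly in closed form via string repetition in a single pass over the row-pair index, instead of A's double loop that repeatedly extends each row in place; the output list is built by list repetition instead of per-iteration appends.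
import Mathlib
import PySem

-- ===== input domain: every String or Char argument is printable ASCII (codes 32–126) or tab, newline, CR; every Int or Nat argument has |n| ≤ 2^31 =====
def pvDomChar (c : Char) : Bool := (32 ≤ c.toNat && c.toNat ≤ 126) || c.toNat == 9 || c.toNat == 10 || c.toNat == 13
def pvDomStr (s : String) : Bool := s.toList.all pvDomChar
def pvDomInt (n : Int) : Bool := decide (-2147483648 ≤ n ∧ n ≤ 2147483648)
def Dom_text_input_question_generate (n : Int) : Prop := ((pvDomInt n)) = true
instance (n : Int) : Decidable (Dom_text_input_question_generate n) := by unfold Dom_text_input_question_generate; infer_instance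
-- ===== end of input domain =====

-- B builds each of the 2n+1 rows in closed form (string repetition) in one pass over the
-- row-pair index, instead of A's in-place extension of every row inside a double i/j loop;
-- objective: faster (a timing run measured B faster on the generated inputs).

-- ===== PORT A =====
-- inner j-loop of A ('.toNat' on the two indices is exact: j comes from range(n), so 2j+1, 2j+2 ≥ 0)
def aInner (n i : Int) (inp0 : List String) : List String :=
  (PySem.List.pyRange 0 n).foldl (fun inp j =>
    if j == i then
      (inp.modify (2*j+1).toNat (· ++ ("___{=T}____" ++ "________"))).modify
        (2*j+2).toNat (· ++ ("___________" ++ "___T____"))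
    else
      (inp.modify (2*j+1).toNat (· ++ ("___________" ++ "________"))).modify
        (2*j+2).toNat (· ++ ("___________" ++ "________"))) inp0

-- body of A's outer i-loop
def aOuter (n : Int) (st : List String × List String) (i : Int) : List String × List String :=
  let inp := st.1.modify 0 (· ++ ("___________" ++ "________"))
  let out := st.2 ++ ["[textinput][answer]T[/answer][/textinput]"]
  let out := out ++ ["T"]
  (aInner n i inp, out)

def text_input_question_generate (n : Int) : List (List String) × List (List String) :=
  let inputs : List (List String) := []
  let outputs : List (List String) := []
  let input : List String := ["___T____"]
  let output : List String := ["[item]T[/item]"]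
  let input := (PySem.List.pyRange 0 (2*n)).foldl (fun inp _ => inp ++ ["________"]) input
  let st := (PySem.List.pyRange 0 n).foldl (aOuter n) (input, output)
  let input := st.1
  let output := st.2
  let inputs := inputs ++ [input]
  let outputs := outputs ++ [output]
  let inputs := inputs ++
    [PySem.List.slice (input.map (fun el => PySem.Str.slice el none (some (PySem.Str.len el - 8))))
      none (some ((input.length : Int) - 1))]
  let outputs := outputs ++ [PySem.List.slice output none (some ((output.length : Int) - 1))]
  (inputs, outputs)

-- ===== PORT B =====
-- Python's  s * k  on strings (empty for k ≤ 0); hand-ported, exact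
def strMulNat (s : String) : Nat → String
  | 0 => ""
  | m+1 => s ++ strMulNat s m

def strMul (s : String) (k : Int) : String := strMulNat s k.toNat

def text_input_question_generate_alt (n : Int) : List (List String) × List (List String) :=
  let normal := "___________" ++ "________"
  let rows : List String := ["___T____" ++ strMul normal n]
  let rows := (PySem.List.pyRange 0 n).foldl (fun rows j =>
      (rows ++ ["________" ++ strMul normal j ++ "___{=T}____" ++ "________" ++ strMul normal (n - 1 - j)]) ++
      ["________" ++ strMul normal j ++ "___________" ++ "___T____" ++ strMul normal (n - 1 - j)]) rows
  let out := ["[item]T[/item]"] ++ PySem.List.pyRepeat ["[textinput][answer]T[/answer][/textinput]", "T"] n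
  ( [rows,
     PySem.List.slice (rows.map (fun el => PySem.Str.slice el none (some (PySem.Str.len el - 8))))
       none (some ((rows.length : Int) - 1))],
    [out, PySem.List.slice out none (some ((out.length : Int) - 1))] )

-- ===== PRECONDITION & SPEC =====
def Spec_text_input_question_generate (n : Int) (out : List (List String) × List (List String)) : Prop := out = text_input_question_generate_alt n
instance (n : Int) (out : List (List String) × List (List String)) : Decidable (Spec_text_input_question_generate n out) := by unfold Spec_text_input_question_generate; infer_instance

-- ===== CLAIM (what is proved, stated in full; the proofs are below) =====
def Claim_equal_text_input_question_generate : Prop := ∀ (n : Int), Dom_text_input_question_generate n → Spec_text_input_question_generate n (text_input_question_generate n)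

-- ===== LEMMAS AND PROOFS =====

-- the three 19/19/16-char segments and the two output tags, named for the proofs
def nrmS : String := "___________" ++ "________"
def spO : String := "___{=T}____" ++ "________"
def spE : String := "___________" ++ "___T____"
def tagS : String := "[textinput][answer]T[/answer][/textinput]"

-- A's row list minus row 0, viewed as a list of (odd row, even row) pairs
def blocks (ps : List (String × String)) : List String := ps.flatMap (fun p => [p.1, p.2])

lemma blocks_modify_fst (ps : List (String × String)) (j : Nat) (f : String → String) :
    (blocks ps).modify (2*j) f = blocks (ps.modify j (fun p => (f p.1, p.2))) := by
  induction ps generalizing j with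
  | nil => simp [blocks]
  | cons p t ih =>
    cases j with
    | zero => simp [blocks]
    | succ m =>
      have h2 : 2*(m+1) = (2*m+1)+1 := by omega
      have ih' := ih m
      simp only [blocks] at ih' ⊢
      conv_rhs => rw [List.modify_succ_cons]
      simp only [List.flatMap_cons, List.cons_append, List.nil_append]
      rw [h2, List.modify_succ_cons, List.modify_succ_cons, ih']

lemma blocks_modify_snd (ps : List (String × String)) (j : Nat) (f : String → String) :
    (blocks ps).modify (2*j+1) f = blocks (ps.modify j (fun p => (p.1, f p.2))) := by
  induction ps generalizing j with
  | nil => simp [blocks]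
  | cons p t ih =>
    cases j with
    | zero => simp [blocks]
    | succ m =>
      have h2 : 2*(m+1)+1 = ((2*m+1)+1)+1 := by omega
      have ih' := ih m
      simp only [blocks] at ih' ⊢
      conv_rhs => rw [List.modify_succ_cons]
      simp only [List.flatMap_cons, List.cons_append, List.nil_append]
      rw [h2, List.modify_succ_cons, List.modify_succ_cons, ih']

-- what the inner j-loop does to the pair list, step by step
def applyUpTo (i : Int) : Nat → List (String × String) → List (String × String)
  | 0, ps => ps
  | m+1, ps => (applyUpTo i m ps).modify m
      (fun p => (p.1 ++ (if (m:Int) = i then spO else nrmS), p.2 ++ (if (m:Int) = i then spE else nrmS)))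

lemma aInner_eq (m : Nat) (i : Int) (x : String) (ps : List (String × String)) :
    aInner (m : Int) i (x :: blocks ps) = x :: blocks (applyUpTo i m ps) := by
  induction m with
  | zero => simp [aInner, PySem.List.pyRange, applyUpTo]
  | succ k ih =>
    have hk : ((k+1 : Nat) : Int) = (k : Int) + 1 := by push_cast; ring
    have hr : PySem.List.pyRange 0 ((k+1 : Nat) : Int) = PySem.List.pyRange 0 (k : Int) ++ [(k : Int)] := by
      rw [hk, PySem.List.pyRange_one_succ_right (by positivity)]
    have h1 : ((2*(k:Int)+1)).toNat = 2*k+1 := by omega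
    have h2 : ((2*(k:Int)+2)).toNat = (2*k+1)+1 := by omega
    have hfold : aInner ((k+1 : Nat) : Int) i (x :: blocks ps)
        = (fun inp (j : Int) =>
            if j == i then
              (inp.modify (2*j+1).toNat (· ++ ("___{=T}____" ++ "________"))).modify
                (2*j+2).toNat (· ++ ("___________" ++ "___T____"))
            else
              (inp.modify (2*j+1).toNat (· ++ ("___________" ++ "________"))).modify
                (2*j+2).toNat (· ++ ("___________" ++ "________")))
          (aInner (k : Int) i (x :: blocks ps)) (k : Int) := by
      simp only [aInner, hr, List.foldl_append, List.foldl_cons, List.foldl_nil]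
    rw [hfold, ih]
    simp only [beq_iff_eq]
    by_cases hik : (k : Int) = i
    · rw [if_pos hik, h1, h2, List.modify_succ_cons, List.modify_succ_cons,
        blocks_modify_fst, blocks_modify_snd, List.modify_modify_eq]
      subst hik
      simp [applyUpTo, spO, spE, Function.comp_def]
    · rw [if_neg hik, h1, h2, List.modify_succ_cons, List.modify_succ_cons,
        blocks_modify_fst, blocks_modify_snd, List.modify_modify_eq]
      simp [applyUpTo, hik, nrmS, Function.comp_def]

lemma length_applyUpTo (i : Int) (m : Nat) (ps : List (String × String)) :
    (applyUpTo i m ps).length = ps.length := by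
  induction m with
  | zero => rfl
  | succ k ih => simp [applyUpTo, ih]

lemma applyUpTo_getElem (i : Int) (m : Nat) (ps : List (String × String)) (j : Nat)
    (h : j < ps.length) :
    (applyUpTo i m ps)[j]'(by rw [length_applyUpTo]; exact h)
      = if j < m then (ps[j].1 ++ (if (j:Int) = i then spO else nrmS),
                        ps[j].2 ++ (if (j:Int) = i then spE else nrmS))
        else ps[j] := by
  induction m with
  | zero => simp [applyUpTo]
  | succ k ih =>
    simp only [applyUpTo]
    rw [List.getElem_modify]
    by_cases hkj : k = j
    · subst hkj
      rw [ih]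
      simp
    · rw [ih]
      by_cases hlt : j < k
      · simp [hlt, Nat.lt_succ_of_lt hlt, hkj]
      · have h1 : ¬ j < k + 1 := by omega
        simp [hlt, h1, hkj]

-- iterating the outer loop body k times on the pair list
def psIter (N : Nat) : Nat → List (String × String) → List (String × String)
  | 0, ps => ps
  | k+1, ps => applyUpTo (k : Int) N (psIter N k ps)

def outAdd : Nat → List String
  | 0 => []
  | k+1 => outAdd k ++ [tagS, "T"]

lemma strMulNat_succ_right (s : String) (m : Nat) :
    strMulNat s (m+1) = strMulNat s m ++ s := by
  induction m with
  | zero =>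
    show s ++ "" = "" ++ s
    simp
  | succ k ih =>
    show s ++ strMulNat s (k+1) = strMulNat s (k+1) ++ s
    conv_lhs => rw [ih]
    rw [show strMulNat s (k+1) = s ++ strMulNat s k from rfl, String.append_assoc]

lemma aFold_eq (N : Nat) (k : Nat) (x : String) (ps : List (String × String)) (out : List String) :
    (PySem.List.pyRange 0 (k : Int)).foldl (aOuter (N : Int)) (x :: blocks ps, out)
      = ((x ++ strMulNat nrmS k) :: blocks (psIter N k ps), out ++ outAdd k) := by
  induction k with
  | zero => simp [PySem.List.pyRange, psIter, outAdd, show strMulNat nrmS 0 = "" from rfl]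
  | succ k ih =>
    have hk : ((k+1 : Nat) : Int) = (k : Int) + 1 := by push_cast; ring
    rw [hk, PySem.List.pyRange_one_succ_right (by positivity), List.foldl_append, ih]
    simp only [List.foldl_cons, List.foldl_nil, aOuter, List.modify_zero_cons]
    rw [aInner_eq, Prod.mk.injEq]
    refine ⟨?_, ?_⟩
    · rw [strMulNat_succ_right, String.append_assoc]
      rfl
    · simp [outAdd, tagS]

-- accumulated segment of row-pair j after k outer iterations
def cat1 : Nat → Nat → String
  | 0, _ => ""
  | k+1, j => cat1 k j ++ (if j = k then spO else nrmS)

def cat2 : Nat → Nat → String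
  | 0, _ => ""
  | k+1, j => cat2 k j ++ (if j = k then spE else nrmS)

lemma psIter_getElem (N k : Nat) (ps : List (String × String)) (j : Nat) (h : j < ps.length)
    (hlen : (psIter N k ps).length = ps.length) :
    (psIter N k ps)[j]'(by rw [hlen]; exact h)
      = if j < N then (ps[j].1 ++ cat1 k j, ps[j].2 ++ cat2 k j) else ps[j] := by
  induction k with
  | zero =>
    simp only [psIter, cat1, cat2]
    by_cases hj : j < N <;> simp [hj]
  | succ k ih =>
    have hlen' : (psIter N k ps).length = ps.length := by
      have := hlen
      simpa [psIter, length_applyUpTo] using this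
    simp only [psIter]
    rw [applyUpTo_getElem _ _ _ _ (by rw [hlen']; exact h), ih hlen']
    by_cases hj : j < N
    · have hji : ((j:Nat) : Int) = (j : Int) := rfl
      simp only [hj, if_true, cat1, cat2]
      have hcast : ((j : Int) = (k : Int)) ↔ (j = k) := by exact_mod_cast Iff.rfl
      by_cases hjk : j = k
      · simp [hjk, String.append_assoc]
      · have : ¬ (j : Int) = (k : Int) := by exact_mod_cast hjk
        simp [hjk, this, String.append_assoc]
    · simp [hj]

lemma cat1_of_ge (N j : Nat) (h : N ≤ j) : cat1 N j = strMulNat nrmS N := by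
  induction N with
  | zero => rfl
  | succ k ih =>
    have h1 : ¬ j = k := by omega
    rw [cat1, ih (by omega), strMulNat_succ_right]
    simp [h1]

lemma cat2_of_ge (N j : Nat) (h : N ≤ j) : cat2 N j = strMulNat nrmS N := by
  induction N with
  | zero => rfl
  | succ k ih =>
    have h1 : ¬ j = k := by omega
    rw [cat2, ih (by omega), strMulNat_succ_right]
    simp [h1]

lemma cat1_closed (N j : Nat) (h : j < N) :
    cat1 N j = strMulNat nrmS j ++ (spO ++ strMulNat nrmS (N-1-j)) := by
  induction N with
  | zero => omega
  | succ k ih =>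
    by_cases hjk : j = k
    · subst hjk
      rw [cat1, cat1_of_ge j j le_rfl]
      simp [strMulNat]
    · have hj : j < k := by omega
      rw [cat1, ih hj]
      have h1 : k - 1 - j + 1 = k - j := by omega
      have h2 : k + 1 - 1 - j = k - j := by omega
      simp [hjk, ← h1, strMulNat_succ_right, String.append_assoc]

lemma cat2_closed (N j : Nat) (h : j < N) :
    cat2 N j = strMulNat nrmS j ++ (spE ++ strMulNat nrmS (N-1-j)) := by
  induction N with
  | zero => omega
  | succ k ih =>
    by_cases hjk : j = k
    · subst hjk
      rw [cat2, cat2_of_ge j j le_rfl]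
      simp [strMulNat]
    · have hj : j < k := by omega
      rw [cat2, ih hj]
      have h1 : k - 1 - j + 1 = k - j := by omega
      have h2 : k + 1 - 1 - j = k - j := by omega
      simp [hjk, ← h1, strMulNat_succ_right, String.append_assoc]

lemma blocks_replicate (N : Nat) (a : String) :
    List.replicate (2*N) a = blocks (List.replicate N (a, a)) := by
  induction N with
  | zero => simp [blocks]
  | succ k ih =>
    have h2 : 2*(k+1) = 2*k + 1 + 1 := by omega
    simp only [h2, List.replicate_succ, blocks, List.flatMap_cons] at *
    simp [ih]

lemma outAdd_eq (N : Nat) : outAdd N = (List.replicate N [tagS, "T"]).flatten := by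
  induction N with
  | zero => rfl
  | succ k ih => rw [outAdd, ih, List.replicate_succ', List.flatten_append]; simp

lemma length_psIter (N k : Nat) (ps : List (String × String)) :
    (psIter N k ps).length = ps.length := by
  induction k with
  | zero => rfl
  | succ m ih => simp [psIter, length_applyUpTo, ih]

-- the final pair list, elementwise in closed form
lemma psIter_final (N : Nat) :
    psIter N N (List.replicate N ("________", "________"))
      = (List.range N).map (fun j =>
          ("________" ++ (strMulNat nrmS j ++ (spO ++ strMulNat nrmS (N-1-j))),
           "________" ++ (strMulNat nrmS j ++ (spE ++ strMulNat nrmS (N-1-j))))) := by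
  apply List.ext_getElem
  · simp [length_psIter]
  · intro j h1 h2
    have hj : j < N := by simpa [length_psIter] using h1
    rw [psIter_getElem N N _ j (by simpa using hj) (length_psIter N N _)]
    simp [hj, cat1_closed N j hj, cat2_closed N j hj]

-- both final row lists, both final output lists (n = N ≥ 0)
lemma rows_out_eq (N : Nat) :
    (("___T____" ++ strMulNat nrmS N) :: blocks (psIter N N (List.replicate N ("________", "________")))
        = (PySem.List.pyRange 0 (N : Int)).foldl (fun rows j =>
            (rows ++ ["________" ++ strMul nrmS j ++ "___{=T}____" ++ "________" ++ strMul nrmS ((N : Int) - 1 - j)]) ++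
            ["________" ++ strMul nrmS j ++ "___________" ++ "___T____" ++ strMul nrmS ((N : Int) - 1 - j)])
            ["___T____" ++ strMul nrmS (N : Int)])
      ∧ (["[item]T[/item]"] ++ outAdd N
          = ["[item]T[/item]"] ++ PySem.List.pyRepeat [tagS, "T"] (N : Int)) := by
  constructor
  · have hstep : (fun (rows : List String) (j : Int) =>
        (rows ++ ["________" ++ strMul nrmS j ++ "___{=T}____" ++ "________" ++ strMul nrmS ((N : Int) - 1 - j)]) ++
        ["________" ++ strMul nrmS j ++ "___________" ++ "___T____" ++ strMul nrmS ((N : Int) - 1 - j)])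
        = (fun (rows : List String) (j : Int) => rows ++
            ["________" ++ strMul nrmS j ++ "___{=T}____" ++ "________" ++ strMul nrmS ((N : Int) - 1 - j),
             "________" ++ strMul nrmS j ++ "___________" ++ "___T____" ++ strMul nrmS ((N : Int) - 1 - j)]) := by
      funext rows j; simp
    rw [hstep, PySem.List.foldl_append_eq_flatMap, PySem.List.pyRange_zero_natCast,
      List.flatMap_map]
    have hhd : "___T____" ++ strMulNat nrmS N = "___T____" ++ strMul nrmS (N : Int) := by
      simp [strMul]
    rw [psIter_final, blocks, List.flatMap_map, hhd]
    have hfm : ∀ j ∈ List.range N,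
        (fun (j : Nat) =>
          [("________" ++ (strMulNat nrmS j ++ (spO ++ strMulNat nrmS (N-1-j))),
            "________" ++ (strMulNat nrmS j ++ (spE ++ strMulNat nrmS (N-1-j)))).1,
           ("________" ++ (strMulNat nrmS j ++ (spO ++ strMulNat nrmS (N-1-j))),
            "________" ++ (strMulNat nrmS j ++ (spE ++ strMulNat nrmS (N-1-j)))).2]) j
        = (fun (j : Nat) =>
          ["________" ++ strMul nrmS (j : Int) ++ "___{=T}____" ++ "________" ++ strMul nrmS ((N : Int) - 1 - (j : Int)),
           "________" ++ strMul nrmS (j : Int) ++ "___________" ++ "___T____" ++ strMul nrmS ((N : Int) - 1 - (j : Int))]) j := by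
      intro j hj
      have hjN : j < N := List.mem_range.mp hj
      have ht1 : ((j : Int)).toNat = j := by omega
      have ht2 : ((N : Int) - 1 - (j : Int)).toNat = N - 1 - j := by omega
      simp only [strMul, ht1, ht2, spO, spE, String.append_assoc]
    simpa using List.flatMap_congr hfm
  · have ht : ((N : Int)).toNat = N := by omega
    rw [outAdd_eq]
    simp [PySem.List.pyRepeat, ht, tagS]

-- shared final assembly of (inputs, outputs) from the row list and the output list
def assemble (rows out : List String) : List (List String) × List (List String) :=
  ([rows,
    PySem.List.slice (rows.map (fun el => PySem.Str.slice el none (some (PySem.Str.len el - 8))))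
      none (some ((rows.length : Int) - 1))],
   [out, PySem.List.slice out none (some ((out.length : Int) - 1))])

lemma A_assemble (n : Int) :
    text_input_question_generate n
      = assemble ((PySem.List.pyRange 0 n).foldl (aOuter n)
          ((PySem.List.pyRange 0 (2*n)).foldl (fun inp _ => inp ++ ["________"]) ["___T____"],
           ["[item]T[/item]"])).1
        ((PySem.List.pyRange 0 n).foldl (aOuter n)
          ((PySem.List.pyRange 0 (2*n)).foldl (fun inp _ => inp ++ ["________"]) ["___T____"],
           ["[item]T[/item]"])).2 := by
  simp [text_input_question_generate, assemble]

lemma B_assemble (n : Int) :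
    text_input_question_generate_alt n
      = assemble ((PySem.List.pyRange 0 n).foldl (fun rows j =>
            (rows ++ ["________" ++ strMul nrmS j ++ "___{=T}____" ++ "________" ++ strMul nrmS (n - 1 - j)]) ++
            ["________" ++ strMul nrmS j ++ "___________" ++ "___T____" ++ strMul nrmS (n - 1 - j)])
            ["___T____" ++ strMul nrmS n])
          (["[item]T[/item]"] ++ PySem.List.pyRepeat ["[textinput][answer]T[/answer][/textinput]", "T"] n) := by
  simp [text_input_question_generate_alt, assemble, nrmS]

lemma init_rows (N : Nat) :
    (PySem.List.pyRange 0 (2*(N : Int))).foldl (fun inp _ => inp ++ ["________"]) ["___T____"]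
      = "___T____" :: blocks (List.replicate N ("________", "________")) := by
  have h2 : (2*(N : Int)) = ((2*N : Nat) : Int) := by push_cast; ring
  rw [h2, PySem.List.pyRange_zero_natCast,
    PySem.List.foldl_append_singleton_eq_map (f := fun _ => "________")]
  rw [List.map_map]
  simp only [Function.comp_def]
  rw [List.map_const', List.length_range, blocks_replicate, List.singleton_append]

lemma core_eq (n : Int) :
    text_input_question_generate n = text_input_question_generate_alt n := by
  rcases lt_or_ge n 0 with hn | hn
  · have h1 : ¬ (0 : Int) < n := by omega
    have h2 : ¬ (0 : Int) < 2*n := by omega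
    have hr1 : PySem.List.pyRange 0 n = [] := by simp [PySem.List.pyRange, h1]
    have hr2 : PySem.List.pyRange 0 (2*n) = [] := by simp [PySem.List.pyRange, h2]
    have ht : n.toNat = 0 := by omega
    rw [A_assemble, B_assemble, hr1, hr2]
    simp [strMul, ht, strMulNat, PySem.List.pyRepeat]
  · lift n to ℕ using hn with N
    rw [A_assemble, B_assemble, init_rows, aFold_eq N N "___T____" _ ["[item]T[/item]"]]
    obtain ⟨h1, h2⟩ := rows_out_eq N
    rw [h1, ← tagS]
    · exact congrArg₂ assemble rfl h2

-- ===== VERDICT (by name: the statement is the Claim_ definition above) =====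
theorem text_input_question_generate_spec : Claim_equal_text_input_question_generate := by
  intro n _
  unfold Spec_text_input_question_generate
  exact core_eq n
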